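-- pv_equiv track=rewrite | github.com/Kyoshiito/SnPTrial | task_03.py | max_odd
-- ===== SOURCE A (Python) =====
-- def max_odd(array):
--     tmp_array = []
--     if not array:
--         return None
--     for j in array:
--         if isinstance(j, (int,float)) and round(j) % 2 != 0:
--             tmp_array.append(round(j))
--     if not tmp_array:
--         return None
--     else:
--         return max(tmp_array)
-- ===== SOURCE B (Python) =====
-- def max_odd(array):
--     best = None
--     for j in array:
--         if isinstance(j, (int, float)) and round(j) % 2 != 0:
--             r = round(j)
--             if best is None or r > best:
--                 best = r
--     return best
-- ===== Notes on version B (the rewrite author's own statement) =====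
-- stated objective: simpler
-- what changed: Replaces the build-filtered-list-then-max (plus explicit empty checks) with a single pass maintaining a scalar running maximum in an Option accumulator; no intermediate list, and None falls out naturally.
import Mathlib
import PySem

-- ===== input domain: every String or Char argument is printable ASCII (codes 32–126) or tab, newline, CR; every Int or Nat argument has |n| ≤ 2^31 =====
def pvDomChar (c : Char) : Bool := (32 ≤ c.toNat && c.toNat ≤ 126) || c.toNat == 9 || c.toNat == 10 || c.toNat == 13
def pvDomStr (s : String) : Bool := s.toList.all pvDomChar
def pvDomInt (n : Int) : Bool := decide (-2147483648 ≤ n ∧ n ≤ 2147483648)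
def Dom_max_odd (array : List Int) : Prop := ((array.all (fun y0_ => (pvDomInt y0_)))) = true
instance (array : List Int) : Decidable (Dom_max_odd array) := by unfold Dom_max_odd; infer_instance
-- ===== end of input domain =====

-- B replaces A's build-filtered-list-then-max with a single-pass running maximum (simpler, O(1) extra space).


-- ===== PORT A =====
-- for Int inputs round(j) = j and isinstance(j,(int,float)) is True
def max_odd (array : List Int) : Option Int :=
  if array = [] then none
  else
    let tmp_array := array.foldl (fun acc j => if PySem.Int.mod j 2 ≠ 0 then acc ++ [j] else acc) []
    if tmp_array = [] then none
    else PySem.List.max? tmp_array (fun x => x)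

-- ===== PORT B =====
def maxOddStep (best : Option Int) (j : Int) : Option Int :=
  if PySem.Int.mod j 2 ≠ 0 then
    match best with
    | none => some j
    | some b => if j > b then some j else some b
  else best

def max_odd_alt (array : List Int) : Option Int :=
  array.foldl maxOddStep none

-- ===== PRECONDITION & SPEC =====
def Spec_max_odd (array : List Int) (out : Option Int) : Prop := out = max_odd_alt array
instance (array : List Int) (out : Option Int) : Decidable (Spec_max_odd array out) := by unfold Spec_max_odd; infer_instance

-- ===== CLAIM (what is proved, stated in full; the proofs are below) =====
def Claim_equal_max_odd : Prop := ∀ (array : List Int), Dom_max_odd array → Spec_max_odd array (max_odd array)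

-- ===== LEMMAS AND PROOFS =====

lemma filt_foldl (l : List Int) (acc : List Int) :
    l.foldl (fun a j => if PySem.Int.mod j 2 ≠ 0 then a ++ [j] else a) acc
      = acc ++ l.filter (fun j => decide (PySem.Int.mod j 2 ≠ 0)) := by
  induction l generalizing acc with
  | nil => simp
  | cons x t ih =>
    simp only [List.foldl, List.filter_cons]
    by_cases h : PySem.Int.mod x 2 ≠ 0
    · rw [if_pos h, if_pos (decide_eq_true h), ih]; simp
    · rw [if_neg h, if_neg (by simpa using h), ih]

lemma fB_filter (l : List Int) (b : Option Int) :
    l.foldl maxOddStep b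
      = (l.filter (fun j => decide (PySem.Int.mod j 2 ≠ 0))).foldl
          (fun o j => match o with
            | none => some j
            | some x => if j > x then some j else some x) b := by
  induction l generalizing b with
  | nil => rfl
  | cons x t ih =>
    simp only [List.foldl, List.filter_cons, maxOddStep]
    by_cases h : PySem.Int.mod x 2 ≠ 0
    · rw [if_pos h, if_pos (decide_eq_true h), ih]; rfl
    · rw [if_neg h, if_neg (by simpa using h), ih]

lemma fold_upd_some (t : List Int) (x : Int) :
    t.foldl (fun o j => match o with
      | none => some j
      | some y => if j > y then some j else some y) (some x)
      = some (t.foldl max x) := by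
  induction t generalizing x with
  | nil => rfl
  | cons a t ih =>
    simp only [List.foldl]
    have hx : (if x < a then some a else some x) = some (max x a) := by
      rw [max_def]; split_ifs <;> simp <;> omega
    simp only [gt_iff_lt, hx, ih]

theorem max_odd_spec_aux (array : List Int) : max_odd array = max_odd_alt array := by
  unfold max_odd max_odd_alt
  rw [fB_filter]
  by_cases he : array = []
  · simp [he]
  · simp only [he, if_false]
    rw [filt_foldl, List.nil_append]
    cases hf : array.filter (fun j => decide (PySem.Int.mod j 2 ≠ 0)) with
    | nil => simp
    | cons x t =>
      rw [if_neg (by simp), PySem.List.max?_id_cons,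
        show List.foldl (fun o j => match o with
            | none => some j
            | some x => if j > x then some j else some x) none (x :: t)
          = List.foldl (fun o j => match o with
            | none => some j
            | some x => if j > x then some j else some x) (some x) t from rfl,
        fold_upd_some]

-- ===== VERDICT (by name: the statement is the Claim_ definition above) =====
theorem max_odd_spec : Claim_equal_max_odd := by
  intro array _
  exact max_odd_spec_aux array
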